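-- pv_equiv track=rewrite | github.com/arthur-ball-dev/fintech-ai-agent | src/agents/file_explorer/actions.py | _generate_llm_analysis_prompt
-- ===== SOURCE A (Python) =====
-- from typing import List, Dict, Any, Optional
--
-- def _generate_llm_analysis_prompt(analysis_type: str, pattern_results: Dict[str, Any],
--                                  code_snippets: List[str]) -> str:
--     """Generate LLM prompt for contextual analysis"""
--
--     base_prompt = f"""
-- You are a senior FinTech engineer analyzing code for {analysis_type}.
--
-- PATTERN-BASED ANALYSIS SUMMARY:
-- {pattern_results.get('summary', 'No pattern analysis available')}
--
-- KEY FINDINGS: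
-- {pattern_results.get('key_findings', 'No key findings')}
--
-- CODE SNIPPETS FOR REVIEW:
-- """
--
--     for i, snippet in enumerate(code_snippets[:3], 1):  # Limit to 3 snippets
--         base_prompt += f"\n--- Snippet {i} ---\n{snippet[:500]}...\n"
--
--     if analysis_type == "regulatory compliance":
--         base_prompt += """
-- ANALYSIS REQUIRED:
-- 1. Identify additional security risks not caught by pattern matching
-- 2. Assess the business impact of compliance gaps
-- 3. Prioritize remediation efforts for a financial services environment
-- 4. Flag any industry-specific compliance concerns (SOX, PCI-DSS, GDPR)
--
-- Provide your analysis in structured format with specific, actionable recommendations.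
-- """
--     elif analysis_type == "risk management":
--         base_prompt += """
-- ANALYSIS REQUIRED:
-- 1. Identify missing risk controls not detected by patterns
-- 2. Assess operational risk exposure in trading scenarios
-- 3. Evaluate the effectiveness of existing risk controls
-- 4. Recommend additional safeguards for financial trading systems
--
-- Focus on practical risk management for live trading environments.
-- """
--     elif analysis_type == "performance optimization":
--         base_prompt += """
-- ANALYSIS REQUIRED:
-- 1. Identify performance bottlenecks not caught by pattern analysis
-- 2. Assess latency-critical code paths for trading systems
-- 3. Recommend specific optimizations for high-frequency trading
-- 4. Evaluate scalability concerns for enterprise deployment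
--
-- Prioritize recommendations that impact trading system performance.
-- """
--     elif analysis_type == "architecture":
--         base_prompt += """
-- ANALYSIS REQUIRED:
-- 1. Assess architectural patterns for FinTech scalability
-- 2. Identify potential single points of failure
-- 3. Evaluate API design for financial services requirements
-- 4. Recommend improvements for enterprise deployment
--
-- Focus on production-ready financial system architecture.
-- """
--
--     return base_prompt
-- ===== SOURCE B (Python) =====
-- # Data-driven rewrite: the prompt is a declarative token template (literal/variable
-- # tokens) interpreted by a tiny renderer over a context mapping, instead of inline
-- # f-string concatenation with an if/elif chain.
--
-- _ANALYSIS_BLOCKS = {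
--     "regulatory compliance": """
-- ANALYSIS REQUIRED:
-- 1. Identify additional security risks not caught by pattern matching
-- 2. Assess the business impact of compliance gaps
-- 3. Prioritize remediation efforts for a financial services environment
-- 4. Flag any industry-specific compliance concerns (SOX, PCI-DSS, GDPR)
--
-- Provide your analysis in structured format with specific, actionable recommendations.
-- """,
--     "risk management": """
-- ANALYSIS REQUIRED:
-- 1. Identify missing risk controls not detected by patterns
-- 2. Assess operational risk exposure in trading scenarios
-- 3. Evaluate the effectiveness of existing risk controls
-- 4. Recommend additional safeguards for financial trading systems
--
-- Focus on practical risk management for live trading environments.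
-- """,
--     "performance optimization": """
-- ANALYSIS REQUIRED:
-- 1. Identify performance bottlenecks not caught by pattern analysis
-- 2. Assess latency-critical code paths for trading systems
-- 3. Recommend specific optimizations for high-frequency trading
-- 4. Evaluate scalability concerns for enterprise deployment
--
-- Prioritize recommendations that impact trading system performance.
-- """,
--     "architecture": """
-- ANALYSIS REQUIRED:
-- 1. Assess architectural patterns for FinTech scalability
-- 2. Identify potential single points of failure
-- 3. Evaluate API design for financial services requirements
-- 4. Recommend improvements for enterprise deployment
--
-- Focus on production-ready financial system architecture.
-- """,
-- }
--
-- # token = ("lit", text) | ("var", name): the whole prompt as declarative data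
-- _PROMPT_TEMPLATE = [
--     ("lit", "\nYou are a senior FinTech engineer analyzing code for "),
--     ("var", "analysis_type"),
--     ("lit", ".\n\nPATTERN-BASED ANALYSIS SUMMARY:\n"),
--     ("var", "summary"),
--     ("lit", "\n\nKEY FINDINGS:\n"),
--     ("var", "key_findings"),
--     ("lit", "\n\nCODE SNIPPETS FOR REVIEW:\n"),
--     ("var", "snippets"),
--     ("var", "analysis_block"),
-- ]
--
-- _SNIPPET_TEMPLATE = [
--     ("lit", "\n--- Snippet "),
--     ("var", "index"),
--     ("lit", " ---\n"),
--     ("var", "body"),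
--     ("lit", "...\n"),
-- ]
--
--
-- def _render(template, ctx):
--     """Interpret a token template: literals verbatim, variables from ctx ('' if absent)."""
--     return "".join(text if kind == "lit" else ctx.get(text, "")
--                    for kind, text in template)
--
--
-- def _generate_llm_analysis_prompt(analysis_type, pattern_results, code_snippets):
--     """Generate LLM prompt for contextual analysis"""
--     snippets = "".join(
--         _render(_SNIPPET_TEMPLATE, {"index": str(i), "body": s[:500]})
--         for i, s in enumerate(code_snippets[:3], 1)
--     )
--     ctx = {
--         "analysis_type": analysis_type,
--         "summary": pattern_results.get("summary", "No pattern analysis available"),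
--         "key_findings": pattern_results.get("key_findings", "No key findings"),
--         "snippets": snippets,
--         "analysis_block": _ANALYSIS_BLOCKS.get(analysis_type, ""),
--     }
--     return _render(_PROMPT_TEMPLATE, ctx)
-- ===== Notes on version B (the rewrite author's own statement) =====
-- stated objective: alternative
-- what changed: B is data-driven: the whole prompt (and each snippet section) is a declarative token template of literal/variable tokens interpreted by a small _render function over a per-call context dict, with the ANALYSIS REQUIRED block supplied as a context variable looked up in a block table, instead of A's inline f-string concatenation, += snippet loop and if/elif chain.
import Mathlib
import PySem

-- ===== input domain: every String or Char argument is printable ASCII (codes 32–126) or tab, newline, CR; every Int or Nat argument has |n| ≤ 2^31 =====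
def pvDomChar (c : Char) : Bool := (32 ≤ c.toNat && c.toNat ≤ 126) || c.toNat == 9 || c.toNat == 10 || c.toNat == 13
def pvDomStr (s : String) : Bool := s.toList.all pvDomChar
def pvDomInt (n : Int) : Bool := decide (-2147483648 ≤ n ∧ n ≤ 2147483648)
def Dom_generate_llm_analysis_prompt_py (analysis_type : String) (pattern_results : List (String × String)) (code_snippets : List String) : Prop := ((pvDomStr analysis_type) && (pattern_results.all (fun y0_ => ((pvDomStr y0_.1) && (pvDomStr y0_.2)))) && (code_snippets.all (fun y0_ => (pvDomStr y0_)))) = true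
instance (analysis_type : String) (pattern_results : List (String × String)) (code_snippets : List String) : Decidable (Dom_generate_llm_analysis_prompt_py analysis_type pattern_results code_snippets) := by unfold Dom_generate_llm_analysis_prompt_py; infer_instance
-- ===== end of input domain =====

-- B is data-driven: the prompt is a declarative token template (literal/variable tokens) interpreted by a small renderer over a context dict, with the ANALYSIS REQUIRED block a looked-up context variable; same output as A's inline concatenation with an if/elif chain.


-- ===== PORT A =====
def generate_llm_analysis_prompt_py (analysis_type : String) (pattern_results : List (String × String)) (code_snippets : List String) : String :=
  let base_prompt :=
    "\nYou are a senior FinTech engineer analyzing code for " ++ analysis_type ++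
    ".\n\nPATTERN-BASED ANALYSIS SUMMARY:\n" ++
    PySem.Dict.getD (PySem.Dict.mk pattern_results) "summary" "No pattern analysis available" ++
    "\n\nKEY FINDINGS:\n" ++
    PySem.Dict.getD (PySem.Dict.mk pattern_results) "key_findings" "No key findings" ++
    "\n\nCODE SNIPPETS FOR REVIEW:\n"
  let base_prompt :=
    (PySem.List.enumerate (PySem.List.slice code_snippets none (some 3)) 1).foldl
      (fun acc p =>
        acc ++ ("\n--- Snippet " ++ PySem.Int.toStr p.1 ++ " ---\n" ++
                PySem.Str.slice p.2 none (some 500) ++ "...\n"))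
      base_prompt
  if analysis_type == "regulatory compliance" then base_prompt ++ "\nANALYSIS REQUIRED:\n1. Identify additional security risks not caught by pattern matching\n2. Assess the business impact of compliance gaps\n3. Prioritize remediation efforts for a financial services environment\n4. Flag any industry-specific compliance concerns (SOX, PCI-DSS, GDPR)\n\nProvide your analysis in structured format with specific, actionable recommendations.\n"
  else if analysis_type == "risk management" then base_prompt ++ "\nANALYSIS REQUIRED:\n1. Identify missing risk controls not detected by patterns\n2. Assess operational risk exposure in trading scenarios\n3. Evaluate the effectiveness of existing risk controls\n4. Recommend additional safeguards for financial trading systems\n\nFocus on practical risk management for live trading environments.\n"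
  else if analysis_type == "performance optimization" then base_prompt ++ "\nANALYSIS REQUIRED:\n1. Identify performance bottlenecks not caught by pattern analysis\n2. Assess latency-critical code paths for trading systems\n3. Recommend specific optimizations for high-frequency trading\n4. Evaluate scalability concerns for enterprise deployment\n\nPrioritize recommendations that impact trading system performance.\n"
  else if analysis_type == "architecture" then base_prompt ++ "\nANALYSIS REQUIRED:\n1. Assess architectural patterns for FinTech scalability\n2. Identify potential single points of failure\n3. Evaluate API design for financial services requirements\n4. Recommend improvements for enterprise deployment\n\nFocus on production-ready financial system architecture.\n"
  else base_prompt

-- ===== PORT B =====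
-- token = ("lit", text) | ("var", name) of Source B
inductive PvTok : Type
  | lit : String → PvTok
  | var : String → PvTok
deriving DecidableEq, Repr

-- Source B's _render: literals verbatim, variables from ctx ('' if absent), joined once
def pvRender (template : List PvTok) (ctx : PySem.Dict String String) : String :=
  PySem.Str.join ""
    (template.map (fun t =>
      match t with
      | .lit s => s
      | .var n => PySem.Dict.getD ctx n ""))

def pvAnalysisBlocks : PySem.Dict String String :=
  PySem.Dict.mk
  [("regulatory compliance", "\nANALYSIS REQUIRED:\n1. Identify additional security risks not caught by pattern matching\n2. Assess the business impact of compliance gaps\n3. Prioritize remediation efforts for a financial services environment\n4. Flag any industry-specific compliance concerns (SOX, PCI-DSS, GDPR)\n\nProvide your analysis in structured format with specific, actionable recommendations.\n"),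
   ("risk management", "\nANALYSIS REQUIRED:\n1. Identify missing risk controls not detected by patterns\n2. Assess operational risk exposure in trading scenarios\n3. Evaluate the effectiveness of existing risk controls\n4. Recommend additional safeguards for financial trading systems\n\nFocus on practical risk management for live trading environments.\n"),
   ("performance optimization", "\nANALYSIS REQUIRED:\n1. Identify performance bottlenecks not caught by pattern analysis\n2. Assess latency-critical code paths for trading systems\n3. Recommend specific optimizations for high-frequency trading\n4. Evaluate scalability concerns for enterprise deployment\n\nPrioritize recommendations that impact trading system performance.\n"),
   ("architecture", "\nANALYSIS REQUIRED:\n1. Assess architectural patterns for FinTech scalability\n2. Identify potential single points of failure\n3. Evaluate API design for financial services requirements\n4. Recommend improvements for enterprise deployment\n\nFocus on production-ready financial system architecture.\n")]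

def pvPromptTemplate : List PvTok :=
  [.lit "\nYou are a senior FinTech engineer analyzing code for ",
   .var "analysis_type",
   .lit ".\n\nPATTERN-BASED ANALYSIS SUMMARY:\n",
   .var "summary",
   .lit "\n\nKEY FINDINGS:\n",
   .var "key_findings",
   .lit "\n\nCODE SNIPPETS FOR REVIEW:\n",
   .var "snippets",
   .var "analysis_block"]

def pvSnippetTemplate : List PvTok :=
  [.lit "\n--- Snippet ", .var "index", .lit " ---\n", .var "body", .lit "...\n"]

def generate_llm_analysis_prompt_py_alt (analysis_type : String) (pattern_results : List (String × String)) (code_snippets : List String) : String :=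
  let snippets :=
    PySem.Str.join ""
      ((PySem.List.enumerate (PySem.List.slice code_snippets none (some 3)) 1).map
        (fun p => pvRender pvSnippetTemplate
          (PySem.Dict.mk [("index", PySem.Int.toStr p.1),
                          ("body", PySem.Str.slice p.2 none (some 500))])))
  let ctx := PySem.Dict.mk
    [("analysis_type", analysis_type),
     ("summary", PySem.Dict.getD (PySem.Dict.mk pattern_results) "summary" "No pattern analysis available"),
     ("key_findings", PySem.Dict.getD (PySem.Dict.mk pattern_results) "key_findings" "No key findings"),
     ("snippets", snippets),
     ("analysis_block", PySem.Dict.getD pvAnalysisBlocks analysis_type "")]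
  pvRender pvPromptTemplate ctx

-- ===== PRECONDITION & SPEC =====
def Spec_generate_llm_analysis_prompt_py (analysis_type : String) (pattern_results : List (String × String)) (code_snippets : List String) (out : String) : Prop := out = generate_llm_analysis_prompt_py_alt analysis_type pattern_results code_snippets
instance (analysis_type : String) (pattern_results : List (String × String)) (code_snippets : List String) (out : String) : Decidable (Spec_generate_llm_analysis_prompt_py analysis_type pattern_results code_snippets out) := by unfold Spec_generate_llm_analysis_prompt_py; infer_instance

-- ===== CLAIM (what is proved, stated in full; the proofs are below) =====
def Claim_equal_generate_llm_analysis_prompt_py : Prop := ∀ (analysis_type : String) (pattern_results : List (String × String)) (code_snippets : List String), Dom_generate_llm_analysis_prompt_py analysis_type pattern_results code_snippets → Spec_generate_llm_analysis_prompt_py analysis_type pattern_results code_snippets (generate_llm_analysis_prompt_py analysis_type pattern_results code_snippets)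

-- ===== LEMMAS AND PROOFS =====
theorem pv_join_nil : PySem.Str.join "" ([] : List String) = "" := by
  simp [PySem.Str.join, PySem.Chars.join_nil]

theorem pv_join_cons (x : String) (xs : List String) :
    PySem.Str.join "" (x :: xs) = x ++ PySem.Str.join "" xs := by
  cases xs with
  | nil => simp [PySem.Str.join, PySem.Chars.join_singleton, PySem.Chars.join_nil]
  | cons y ys => simp [PySem.Str.join, PySem.Chars.join_cons_cons]

-- a += loop appending f x each step equals acc ++ "".join(map f l)
theorem pv_foldl_eq_append_join {α : Type} (l : List α) (f : α → String) (acc : String) :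
    l.foldl (fun a x => a ++ f x) acc = acc ++ PySem.Str.join "" (l.map f) := by
  induction l generalizing acc with
  | nil => simp [pv_join_nil]
  | cons x xs ih =>
      simp only [List.foldl_cons, List.map_cons, pv_join_cons, ih, String.append_assoc]

-- rendering the snippet template equals A's per-snippet piece
theorem pv_render_snippet (p : Int × String) :
    pvRender pvSnippetTemplate
      (PySem.Dict.mk [("index", PySem.Int.toStr p.1),
                      ("body", PySem.Str.slice p.2 none (some 500))]) =
    "\n--- Snippet " ++ PySem.Int.toStr p.1 ++ " ---\n" ++
      PySem.Str.slice p.2 none (some 500) ++ "...\n" := by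
  simp [pvRender, pvSnippetTemplate, pv_join_cons, pv_join_nil,
        PySem.Dict.getD_eq_get?_getD, PySem.Dict.get?_mk_cons, String.append_assoc]

-- ===== VERDICT (by name: the statement is the Claim_ definition above) =====
theorem generate_llm_analysis_prompt_py_spec : Claim_equal_generate_llm_analysis_prompt_py := by
  intro analysis_type pattern_results code_snippets _
  unfold Spec_generate_llm_analysis_prompt_py
  simp only [generate_llm_analysis_prompt_py, generate_llm_analysis_prompt_py_alt]
  rw [pv_foldl_eq_append_join]
  have hmap :
      (PySem.List.enumerate (PySem.List.slice code_snippets none (some 3)) 1).map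
        (fun p => pvRender pvSnippetTemplate
          (PySem.Dict.mk [("index", PySem.Int.toStr p.1),
                          ("body", PySem.Str.slice p.2 none (some 500))])) =
      (PySem.List.enumerate (PySem.List.slice code_snippets none (some 3)) 1).map
        (fun p => "\n--- Snippet " ++ PySem.Int.toStr p.1 ++ " ---\n" ++
                  PySem.Str.slice p.2 none (some 500) ++ "...\n") := by
    exact List.map_congr_left (fun p _ => pv_render_snippet p)
  rw [hmap]
  simp [pvRender, pvPromptTemplate, pv_join_cons, pv_join_nil,
        PySem.Dict.getD_eq_get?_getD, PySem.Dict.get?_mk_cons]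
  split_ifs with h1 h2 h3 h4
  · simp_all [← String.append_assoc, pvAnalysisBlocks, PySem.Dict.get?_mk_cons]
  · simp_all [← String.append_assoc, pvAnalysisBlocks, PySem.Dict.get?_mk_cons]
  · simp_all [← String.append_assoc, pvAnalysisBlocks, PySem.Dict.get?_mk_cons]
  · simp_all [← String.append_assoc, pvAnalysisBlocks, PySem.Dict.get?_mk_cons]
  · simp_all [← String.append_assoc, pvAnalysisBlocks, PySem.Dict.get?,
              Ne.symm h1, Ne.symm h2, Ne.symm h3, Ne.symm h4]
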